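-- pv_equiv track=rewrite | github.com/sararufael/AdobeAssignment | Coins.py | coin_combinations
-- ===== SOURCE A (Python) =====
-- def coin_combinations(coins, start_index, end_index, coins_left_to_200):
--     """
--     Given an array of coin values, its starting index, its final index, and a total value,
--     find the number of coin combinations that sum to the given total value
--     """
--     # base case for recursion
--     if coins_left_to_200 == 0:
--         return 1
--
--     # initialize solution counter
--     result = 0
--
--     # if 1st coin type <= total value, subtract one of the first type from the constant value as many times as
--     # possible, then subtract the second as many times as possible from the remainder, and so on
--
--     # when our remainder is 0, we have found a solution and increment the solution counter
--     for i in range(start_index, end_index + 1):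
--         if coins[i] <= coins_left_to_200:
--             result += coin_combinations(coins, i, end_index, coins_left_to_200 - coins[i])
--     return result
-- ===== SOURCE B (Python) =====
-- def coin_combinations(coins, start_index, end_index, coins_left_to_200):
--     """
--     Recursion on the first coin position actually used: pick that position and
--     how many copies of its coin to take (an explicit multiplicity loop), then
--     recurse strictly past it.  A instead re-walks the index range once per
--     single chosen coin.
--     """
--     def ways(idx, remaining):
--         if remaining == 0:
--             return 1
--         total = 0
--         for j in range(idx, end_index + 1):
--             c = coins[j]
--             m = remaining - c
--             while m >= 0:
--                 total += ways(j + 1, m)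
--                 m -= c
--         return total
--     return ways(start_index, coins_left_to_200)
-- ===== Notes on version B (the rewrite author's own statement) =====
-- stated objective: alternative
-- what changed: Replaced A's flat recursion that re-walks the whole index range after every single chosen coin by a recursion on the first position actually used, with an explicit while-loop enumerating that coin's multiplicity before recursing strictly past it.
-- outside the precondition, e.g. on coin_combinations([1, 2], -2, 1, 2): A returns 5, B returns 5; on coin_combinations([-1], 0, 0, -5): A returns 0, B returns 0
import Mathlib
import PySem

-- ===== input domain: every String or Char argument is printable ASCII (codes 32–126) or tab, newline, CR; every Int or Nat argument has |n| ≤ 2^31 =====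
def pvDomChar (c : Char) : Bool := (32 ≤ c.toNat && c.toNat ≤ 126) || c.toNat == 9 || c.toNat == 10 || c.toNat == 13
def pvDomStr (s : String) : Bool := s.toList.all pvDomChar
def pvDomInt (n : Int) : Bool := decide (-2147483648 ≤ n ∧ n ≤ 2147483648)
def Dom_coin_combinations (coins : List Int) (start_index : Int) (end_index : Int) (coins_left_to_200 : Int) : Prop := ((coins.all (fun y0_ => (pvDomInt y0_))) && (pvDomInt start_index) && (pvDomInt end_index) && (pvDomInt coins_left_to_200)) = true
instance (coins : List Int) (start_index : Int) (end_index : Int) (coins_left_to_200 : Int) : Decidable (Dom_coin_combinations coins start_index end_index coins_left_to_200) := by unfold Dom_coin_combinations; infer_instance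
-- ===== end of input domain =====

-- B recurses over coin positions with an explicit per-coin multiplicity loop,
-- instead of A's re-walk of the whole index range after each single chosen coin
-- (a different decomposition; similar cost).

-- ===== PORT A =====
-- A is a recursive Python function; the recursion is transliterated with a fuel
-- parameter that only makes it total: inside Pre_ the recursion depth is at most
-- coins_left_to_200.toNat + 1 (each recursive call strictly decreases the positive
-- remaining amount), so the chosen fuel never runs out.
def coin_combinations_fuel : Nat → List Int → Int → Int → Int → Int
  | 0, _, _, _, _ => 0
  | fuel + 1, coins, start_index, end_index, coins_left_to_200 =>
    if coins_left_to_200 = 0 then 1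
    else
      (PySem.List.pyRange start_index (end_index + 1) 1).foldl
        (fun result i =>
          match PySem.List.pyGet? coins i with
          | none => result  -- IndexError in Python; excluded by Pre_
          | some c =>
            if c ≤ coins_left_to_200 then
              result + coin_combinations_fuel fuel coins i end_index (coins_left_to_200 - c)
            else result) 0

def coin_combinations (coins : List Int) (start_index : Int) (end_index : Int) (coins_left_to_200 : Int) : Int :=
  coin_combinations_fuel (coins_left_to_200.toNat + 1) coins start_index end_index coins_left_to_200

-- ===== PORT B =====
-- Source B's nested function ways(idx, remaining): pick the first position used and
-- the multiplicity of its coin (the while-loop), then recurse past it.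
-- Transliterated as a mutual pair; the Nat arguments are fuel that only makes
-- the recursion total (inside Pre_ the chosen fuels never run out).
mutual
def waysB : Nat → List Int → Int → Int → Int → Int
  | 0, _, _, _, _ => 0
  | n + 1, coins, end_index, idx, remaining =>
    if remaining = 0 then 1
    else
      (PySem.List.pyRange idx (end_index + 1) 1).foldl
        (fun total j =>
          match PySem.List.pyGet? coins j with
          | none => total  -- IndexError in Python; excluded by Pre_
          | some c =>
            waysLoop n coins end_index j c ((remaining - c).toNat + 2) total (remaining - c))
        0
termination_by n _ _ _ _ => (n, 0)
decreasing_by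
  all_goals first
    | exact Prod.Lex.left _ _ (by omega)
    | exact Prod.Lex.right _ (by omega)

def waysLoop : Nat → List Int → Int → Int → Int → Nat → Int → Int → Int
  | _, _, _, _, _, 0, total, _ => total
  | n, coins, end_index, j, c, fu + 1, total, m =>
    if 0 ≤ m then
      waysLoop n coins end_index j c fu (total + waysB n coins end_index (j + 1) m) (m - c)
    else total
termination_by n _ _ _ _ fu _ _ => (n, fu + 1)
decreasing_by
  all_goals first
    | exact Prod.Lex.left _ _ (by omega)
    | exact Prod.Lex.right _ (by omega)
end

def coin_combinations_alt (coins : List Int) (start_index : Int) (end_index : Int) (coins_left_to_200 : Int) : Int :=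
  waysB (coins_left_to_200.toNat + 1) coins end_index start_index coins_left_to_200

-- ===== PRECONDITION & SPEC =====
-- Pre_ restricts to the natural domain of the task: either the amount is 0, or the
-- index range is empty, or the indices are in range (no negative-index wraparound,
-- no IndexError) and every coin in the used slice is positive (a non-positive
-- reachable coin makes Python A recurse without bound).  It excludes some inputs on
-- which A still returns only via accidental negative-index wraparound or because a
-- non-positive coin happens never to be reachable.
def Pre_coin_combinations (coins : List Int) (start_index : Int) (end_index : Int) (coins_left_to_200 : Int) : Prop :=
  coins_left_to_200 = 0 ∨ end_index < start_index ∨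
    (0 ≤ start_index ∧ end_index < (coins.length : Int) ∧
      ∀ c ∈ (coins.take (end_index + 1).toNat).drop start_index.toNat, 1 ≤ c)

instance (coins : List Int) (start_index : Int) (end_index : Int) (coins_left_to_200 : Int) : Decidable (Pre_coin_combinations coins start_index end_index coins_left_to_200) := by unfold Pre_coin_combinations; infer_instance

def pvWitness_coin_combinations : List Int × Int × Int × Int := ([1, 2, 5], 0, 2, 5)

def Spec_coin_combinations (coins : List Int) (start_index : Int) (end_index : Int) (coins_left_to_200 : Int) (out : Int) : Prop := out = coin_combinations_alt coins start_index end_index coins_left_to_200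
instance (coins : List Int) (start_index : Int) (end_index : Int) (coins_left_to_200 : Int) (out : Int) : Decidable (Spec_coin_combinations coins start_index end_index coins_left_to_200 out) := by unfold Spec_coin_combinations; infer_instance

-- ===== CLAIM (what is proved, stated in full; the proofs are below) =====
def Claim_equal_coin_combinations : Prop := ∀ (coins : List Int) (start_index : Int) (end_index : Int) (coins_left_to_200 : Int), Dom_coin_combinations coins start_index end_index coins_left_to_200 → Pre_coin_combinations coins start_index end_index coins_left_to_200 → Spec_coin_combinations coins start_index end_index coins_left_to_200 (coin_combinations coins start_index end_index coins_left_to_200)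

-- ===== LEMMAS AND PROOFS =====

-- Reference count: number of multisets over the coin list l summing to t,
-- written with the head/tail recurrence both ports satisfy.
def cnt (f : Nat) (l : List Int) (t : Int) : Int :=
  if t = 0 then 1
  else
    match l with
    | [] => 0
    | c :: r =>
      (if c ≤ t then (match f with | 0 => 0 | f' + 1 => cnt f' (c :: r) (t - c)) else 0)
        + cnt f r t
termination_by (f, l.length)
decreasing_by
  · exact Prod.Lex.left _ _ (Nat.lt_succ_self f')
  · exact Prod.Lex.right _ (Nat.lt_succ_self r.length)

-- the slice coins[start_index .. end_index] that A's recursion ranges over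
def pvSlice (coins : List Int) (si ei : Int) : List Int :=
  (coins.take (ei + 1).toNat).drop si.toNat

lemma cnt_nil (f : Nat) (t : Int) : cnt f [] t = if t = 0 then 1 else 0 := by
  rw [cnt.eq_def]

lemma cnt_cons (f : Nat) (c : Int) (r : List Int) (t : Int) :
    cnt f (c :: r) t = if t = 0 then 1 else
      (if c ≤ t then (match f with | 0 => 0 | f' + 1 => cnt f' (c :: r) (t - c)) else 0)
        + cnt f r t := by
  rw [cnt.eq_def]

lemma cnt_cons_zero (c : Int) (r : List Int) (t : Int) :
    cnt 0 (c :: r) t = if t = 0 then 1 else (if c ≤ t then (0 : Int) else 0) + cnt 0 r t := by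
  rw [cnt.eq_def]

lemma cnt_cons_succ (f : Nat) (c : Int) (r : List Int) (t : Int) :
    cnt (f + 1) (c :: r) t = if t = 0 then 1 else
      (if c ≤ t then cnt f (c :: r) (t - c) else 0) + cnt (f + 1) r t := by
  rw [cnt.eq_def]

lemma cnt_succ : ∀ (f : Nat) (l : List Int) (t : Int), (∀ c ∈ l, 1 ≤ c) → t.toNat ≤ f →
    cnt (f + 1) l t = cnt f l t := by
  intro f
  induction f with
  | zero =>
    intro l
    induction l with
    | nil => intro t _ _; rw [cnt_nil, cnt_nil]
    | cons c r ih =>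
      intro t hpos ht
      rw [cnt_cons_succ 0 c r t, cnt_cons_zero c r t]
      by_cases h0 : t = 0
      · rw [if_pos h0, if_pos h0]
      · rw [if_neg h0, if_neg h0]
        have hc : ¬ c ≤ t := by have := hpos c List.mem_cons_self; omega
        rw [if_neg hc, if_neg hc, ih t (fun x hx => hpos x (List.mem_cons_of_mem _ hx)) ht]
  | succ f ihf =>
    intro l
    induction l with
    | nil => intro t _ _; rw [cnt_nil, cnt_nil]
    | cons c r ihl =>
      intro t hpos ht
      rw [cnt_cons_succ (f + 1) c r t, cnt_cons_succ f c r t]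
      by_cases h0 : t = 0
      · rw [if_pos h0, if_pos h0]
      · rw [if_neg h0, if_neg h0,
          ihl t (fun x hx => hpos x (List.mem_cons_of_mem _ hx)) (by omega)]
        congr 1
        by_cases hc : c ≤ t
        · rw [if_pos hc, if_pos hc]
          exact ihf (c :: r) (t - c) hpos (by have := hpos c List.mem_cons_self; omega)
        · rw [if_neg hc, if_neg hc]

lemma cnt_neg (f : Nat) (l : List Int) (t : Int) (hpos : ∀ c ∈ l, 1 ≤ c) (ht : t < 0) :
    cnt f l t = 0 := by
  induction l with
  | nil => rw [cnt_nil, if_neg (show t ≠ 0 by omega)]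
  | cons c r ih =>
    have hc : ¬ c ≤ t := by have := hpos c List.mem_cons_self; omega
    rw [cnt_cons f c r t, if_neg (show t ≠ 0 by omega), if_neg hc,
      ih (fun x hx => hpos x (List.mem_cons_of_mem _ hx))]
    simp

lemma pvSlice_nil (coins : List Int) (si ei : Int) (h : ei < si) (h0 : 0 ≤ si) :
    pvSlice coins si ei = [] := by
  apply List.drop_eq_nil_of_le
  have h1 : (coins.take (ei + 1).toNat).length ≤ (ei + 1).toNat := by
    simp [List.length_take]
  omega

lemma pvSlice_cons (coins : List Int) (si ei : Int) (h0 : 0 ≤ si) (h1 : si ≤ ei)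
    (h2 : ei < (coins.length : Int)) :
    pvSlice coins si ei = coins.getD si.toNat 0 :: pvSlice coins (si + 1) ei := by
  unfold pvSlice
  have hlen : si.toNat < (coins.take (ei + 1).toNat).length := by
    simp [List.length_take]; omega
  rw [List.drop_eq_getElem_cons hlen]
  have hsi : si.toNat < coins.length := by omega
  congr 1
  · rw [List.getElem_take]
    exact (List.getD_eq_getElem coins 0 hsi).symm
  · congr 1
    omega

lemma foldl_body_sum (coins : List Int) (ei t : Int) (f : Nat) :
    ∀ (L : List Int) (init : Int),
      L.foldl (fun result i =>
          match PySem.List.pyGet? coins i with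
          | none => result
          | some c =>
            if c ≤ t then result + coin_combinations_fuel f coins i ei (t - c) else result) init
        = init + (L.map (fun i =>
            match PySem.List.pyGet? coins i with
            | none => 0
            | some c => if c ≤ t then coin_combinations_fuel f coins i ei (t - c) else 0)).sum := by
  intro L
  induction L with
  | nil => intro init; simp
  | cons a L ih =>
    intro init
    simp only [List.foldl_cons, List.map_cons, List.sum_cons]
    rw [ih]
    cases h : PySem.List.pyGet? coins a with
    | none => simp
    | some c =>
      by_cases hc : c ≤ t
      · simp only [if_pos hc]
        ring
      · simp only [if_neg hc]
        ring

lemma A_eq_cnt : ∀ (k : Nat) (coins : List Int) (ei : Int) (f n : Nat) (si t : Int),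
    f + n ≤ k → 0 ≤ si → ei < (coins.length : Int) → (ei + 1 - si).toNat ≤ n →
    coin_combinations_fuel (f + 1) coins si ei t = cnt f (pvSlice coins si ei) t := by
  intro k
  induction k with
  | zero =>
    intro coins ei f n si t hk h0 hei hn
    have hf : f = 0 := by omega
    have hes : ei < si := by omega
    subst hf
    rw [pvSlice_nil coins si ei hes h0, coin_combinations_fuel, cnt_nil]
    by_cases h0t : t = 0
    · rw [if_pos h0t, if_pos h0t]
    · rw [if_neg h0t, if_neg h0t, PySem.List.pyRange_one_eq_nil (by omega), List.foldl_nil]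
  | succ k ih =>
    intro coins ei f n si t hk h0 hei hn
    by_cases hes : ei < si
    · rw [pvSlice_nil coins si ei hes h0, coin_combinations_fuel, cnt_nil]
      by_cases h0t : t = 0
      · rw [if_pos h0t, if_pos h0t]
      · rw [if_neg h0t, if_neg h0t, PySem.List.pyRange_one_eq_nil (by omega), List.foldl_nil]
    · push_neg at hes
      have hsilen : si.toNat < coins.length := by omega
      have hget : PySem.List.pyGet? coins si = some (coins.getD si.toNat 0) := by
        rw [PySem.List.pyGet?_eq_some_getElem coins h0 (by omega),
          List.getD_eq_getElem coins 0 hsilen]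
      have hslice := pvSlice_cons coins si ei h0 hes hei
      set c := coins.getD si.toNat 0 with hc
      by_cases h0t : t = 0
      · rw [coin_combinations_fuel, if_pos h0t, hslice, cnt_cons f c _ t, if_pos h0t]
      · -- unfold A at si and split off the first index
        rw [coin_combinations_fuel, if_neg h0t,
          PySem.List.pyRange_one_cons (by omega), List.foldl_cons,
          foldl_body_sum coins ei t f, hget]
        -- tail sum equals A at si+1
        have htail : (((PySem.List.pyRange (si + 1) (ei + 1) 1)).map (fun i =>
            match PySem.List.pyGet? coins i with
            | none => 0
            | some cc => if cc ≤ t then coin_combinations_fuel f coins i ei (t - cc) else 0)).sum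
            = coin_combinations_fuel (f + 1) coins (si + 1) ei t := by
          rw [coin_combinations_fuel, if_neg h0t, foldl_body_sum coins ei t f]
          simp
        rw [htail]
        have htail2 : coin_combinations_fuel (f + 1) coins (si + 1) ei t
            = cnt f (pvSlice coins (si + 1) ei) t :=
          ih coins ei f (n - 1) (si + 1) t (by omega) (by omega) hei (by omega)
        rw [htail2, hslice, cnt_cons f c _ t, if_neg h0t]
        rw [show (match some c with
            | none => 0
            | some cc => if cc ≤ t then 0 + coin_combinations_fuel f coins si ei (t - cc) else 0)
            = (if c ≤ t then 0 + coin_combinations_fuel f coins si ei (t - c) else 0) from rfl]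
        congr 1
        by_cases hct : c ≤ t
        · rw [if_pos hct, if_pos hct, zero_add]
          cases f with
          | zero =>
            show coin_combinations_fuel 0 coins si ei (t - c) = 0
            rw [coin_combinations_fuel]
          | succ f' =>
            show coin_combinations_fuel (f' + 1) coins si ei (t - c)
              = cnt f' (c :: pvSlice coins (si + 1) ei) (t - c)
            rw [ih coins ei f' n si (t - c) (by omega) h0 hei hn, hslice]
        · rw [if_neg hct, if_neg hct]


lemma cnt_zero (f : Nat) (l : List Int) : cnt f l 0 = 1 := by
  rw [cnt.eq_def]
  simp

lemma cnt_fuel_to (l : List Int) (hpos : ∀ c ∈ l, 1 ≤ c) :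
    ∀ (f : Nat) (t : Int), t.toNat ≤ f → cnt f l t = cnt t.toNat l t := by
  intro f
  induction f with
  | zero =>
    intro t ht
    have h : t.toNat = 0 := by omega
    rw [h]
  | succ f ihf =>
    intro t ht
    by_cases h : t.toNat = f + 1
    · rw [h]
    · rw [cnt_succ f l t hpos (by omega), ihf t (by omega)]


lemma waysB_succ (n : Nat) (coins : List Int) (ei idx r : Int) :
    waysB (n + 1) coins ei idx r =
      if r = 0 then 1
      else
        (PySem.List.pyRange idx (ei + 1) 1).foldl
          (fun total j =>
            match PySem.List.pyGet? coins j with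
            | none => total
            | some c => waysLoop n coins ei j c ((r - c).toNat + 2) total (r - c))
          0 := by
  rw [waysB]

lemma waysLoop_zero (n : Nat) (coins : List Int) (ei j c total m : Int) :
    waysLoop n coins ei j c 0 total m = total := by
  rw [waysLoop]

lemma waysLoop_succ (n : Nat) (coins : List Int) (ei j c : Int) (fu : Nat) (total m : Int) :
    waysLoop n coins ei j c (fu + 1) total m =
      if 0 ≤ m then
        waysLoop n coins ei j c fu (total + waysB n coins ei (j + 1) m) (m - c)
      else total := by
  rw [waysLoop]

lemma waysLoop_affine (n : Nat) (coins : List Int) (ei j c : Int) :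
    ∀ (fu : Nat) (total m : Int),
      waysLoop n coins ei j c fu total m = total + waysLoop n coins ei j c fu 0 m := by
  intro fu
  induction fu with
  | zero => intro total m; rw [waysLoop_zero, waysLoop_zero]; ring
  | succ fu ih =>
    intro total m
    rw [waysLoop_succ, waysLoop_succ]
    by_cases hm : 0 ≤ m
    · rw [if_pos hm, if_pos hm, ih (total + waysB n coins ei (j + 1) m) (m - c),
        ih (0 + waysB n coins ei (j + 1) m) (m - c)]
      ring
    · rw [if_neg hm, if_neg hm]; ring

-- one unrolling step of cnt, in the shape of Source B's multiplicity loop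
lemma cnt_step (c : Int) (l : List Int) (r : Int) (hc : 1 ≤ c) (hl : ∀ x ∈ l, 1 ≤ x)
    (hr : 0 ≤ r) :
    cnt r.toNat (c :: l) r
      = cnt r.toNat l r + (if 0 ≤ r - c then cnt (r - c).toNat (c :: l) (r - c) else 0) := by
  by_cases h0 : r = 0
  · subst h0
    rw [cnt_zero, cnt_zero, if_neg (by omega)]
    simp
  · obtain ⟨T, hT⟩ : ∃ T, r.toNat = T + 1 := ⟨r.toNat - 1, by omega⟩
    rw [hT, cnt_cons_succ T c l r, if_neg h0]
    by_cases hcr : c ≤ r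
    · rw [if_pos hcr, if_pos (by omega : (0 : Int) ≤ r - c)]
      rw [show cnt T (c :: l) (r - c) = cnt (r - c).toNat (c :: l) (r - c) from
        cnt_fuel_to (c :: l)
          (by intro x hx; rcases List.mem_cons.mp hx with h | h
              · omega
              · exact hl x h)
          T (r - c) (by omega)]
      ring
    · rw [if_neg hcr, if_neg (by omega : ¬ (0 : Int) ≤ r - c)]
      ring

-- Source B's while-loop accumulates exactly the multiplicity unrolling of cnt
lemma loop_eq (coins : List Int) (ei j c : Int) (n : Nat) (l : List Int) (r0 : Int)
    (hc : 1 ≤ c) (hl : ∀ x ∈ l, 1 ≤ x)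
    (hways : ∀ m : Int, 0 ≤ m → m ≤ r0 → waysB n coins ei (j + 1) m = cnt m.toNat l m) :
    ∀ (fu : Nat) (total m : Int), m ≤ r0 → (0 ≤ m → m.toNat + 2 ≤ fu) → (m < 0 → 1 ≤ fu) →
      waysLoop n coins ei j c fu total m
        = total + (if 0 ≤ m then cnt m.toNat (c :: l) m else 0) := by
  intro fu
  induction fu with
  | zero =>
    intro total m hm0 hfu1 hfu2
    by_cases hm : 0 ≤ m
    · exact absurd (hfu1 hm) (by omega)
    · rw [waysLoop_zero, if_neg hm]
      simp
  | succ fu ih =>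
    intro total m hm0 hfu1 hfu2
    rw [waysLoop_succ]
    by_cases hm : 0 ≤ m
    · rw [if_pos hm, if_pos hm, hways m hm hm0,
        ih (total + cnt m.toNat l m) (m - c) (by omega)
          (by intro h; have := hfu1 hm; omega) (by intro h; have := hfu1 hm; omega),
        cnt_step c l m hc hl hm]
      ring
    · rw [if_neg hm, if_neg hm]
      simp

-- the sum shape of Source B's position loop
lemma foldl_body_sumB (coins : List Int) (ei r : Int) (n : Nat) :
    ∀ (L : List Int) (init : Int),
      L.foldl (fun total j =>
          match PySem.List.pyGet? coins j with
          | none => total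
          | some c => waysLoop n coins ei j c ((r - c).toNat + 2) total (r - c)) init
        = init + (L.map (fun j =>
            match PySem.List.pyGet? coins j with
            | none => 0
            | some c => waysLoop n coins ei j c ((r - c).toNat + 2) 0 (r - c))).sum := by
  intro L
  induction L with
  | nil => intro init; simp
  | cons a L ih =>
    intro init
    simp only [List.foldl_cons, List.map_cons, List.sum_cons]
    rw [ih]
    cases h : PySem.List.pyGet? coins a with
    | none => simp
    | some c =>
      rw [show (match some c with
          | none => init
          | some cc => waysLoop n coins ei a cc ((r - cc).toNat + 2) init (r - cc))
          = waysLoop n coins ei a c ((r - c).toNat + 2) init (r - c) from rfl,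
        show (match some c with
          | none => 0
          | some cc => waysLoop n coins ei a cc ((r - cc).toNat + 2) 0 (r - cc))
          = waysLoop n coins ei a c ((r - c).toNat + 2) 0 (r - c) from rfl,
        waysLoop_affine n coins ei a c ((r - c).toNat + 2) init (r - c)]
      ring

lemma B_eq_cnt : ∀ (k : Nat) (coins : List Int) (ei : Int) (n nr : Nat) (idx r : Int),
    n + nr ≤ k → 0 ≤ idx → ei < (coins.length : Int) → (ei + 1 - idx).toNat ≤ nr →
    (∀ x ∈ pvSlice coins idx ei, 1 ≤ x) → r.toNat ≤ n →
    waysB (n + 1) coins ei idx r = cnt r.toNat (pvSlice coins idx ei) r := by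
  intro k
  induction k with
  | zero =>
    intro coins ei n nr idx r hk h0 hei hnr hpos hrn
    have hes : ei < idx := by omega
    rw [pvSlice_nil coins idx ei hes h0, cnt_nil, waysB_succ]
    by_cases h0t : r = 0
    · rw [if_pos h0t, if_pos h0t]
    · rw [if_neg h0t, if_neg h0t, PySem.List.pyRange_one_eq_nil (by omega), List.foldl_nil]
  | succ k ih =>
    intro coins ei n nr idx r hk h0 hei hnr hpos hrn
    rw [waysB_succ]
    by_cases h0t : r = 0
    · rw [if_pos h0t, h0t, cnt_zero]
    · rw [if_neg h0t]
      by_cases hes : ei < idx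
      · rw [pvSlice_nil coins idx ei hes h0, cnt_nil, if_neg h0t,
          PySem.List.pyRange_one_eq_nil (by omega), List.foldl_nil]
      · push_neg at hes
        have hilen : idx.toNat < coins.length := by omega
        have hget : PySem.List.pyGet? coins idx = some (coins.getD idx.toNat 0) := by
          rw [PySem.List.pyGet?_eq_some_getElem coins h0 (by omega),
            List.getD_eq_getElem coins 0 hilen]
        have hslice := pvSlice_cons coins idx ei h0 hes hei
        set c := coins.getD idx.toNat 0 with hcdef
        have hcpos : 1 ≤ c := hpos c (by rw [hslice]; exact List.mem_cons_self)
        have htail : ∀ x ∈ pvSlice coins (idx + 1) ei, 1 ≤ x := by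
          intro x hx
          exact hpos x (by rw [hslice]; exact List.mem_cons_of_mem _ hx)
        rw [PySem.List.pyRange_one_cons (by omega), List.foldl_cons,
          foldl_body_sumB coins ei r n, hget]
        rw [show (match some c with
            | none => 0
            | some cc => waysLoop n coins ei idx cc ((r - cc).toNat + 2) 0 (r - cc))
            = waysLoop n coins ei idx c ((r - c).toNat + 2) 0 (r - c) from rfl]
        -- the tail of the position loop is waysB at idx + 1
        have htailsum : ((PySem.List.pyRange (idx + 1) (ei + 1) 1).map (fun j =>
            match PySem.List.pyGet? coins j with
            | none => 0
            | some cc => waysLoop n coins ei j cc ((r - cc).toNat + 2) 0 (r - cc))).sum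
            = waysB (n + 1) coins ei (idx + 1) r := by
          rw [waysB_succ, if_neg h0t, foldl_body_sumB coins ei r n]
          simp
        rw [htailsum,
          ih coins ei n (nr - 1) (idx + 1) r (by omega) (by omega) hei (by omega) htail hrn]
        -- the head term: the multiplicity loop for the coin at idx
        have hways : ∀ m : Int, 0 ≤ m → m ≤ r - c →
            waysB n coins ei (idx + 1) m = cnt m.toNat (pvSlice coins (idx + 1) ei) m := by
          intro m hm1 hm2
          obtain ⟨n', rfl⟩ : ∃ n', n = n' + 1 := ⟨n - 1, by omega⟩
          exact ih coins ei n' ((ei + 1 - (idx + 1)).toNat) (idx + 1) m (by omega) (by omega)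
            hei le_rfl htail (by omega)
        rw [loop_eq coins ei idx c n (pvSlice coins (idx + 1) ei) (r - c) hcpos htail hways
          ((r - c).toNat + 2) 0 (r - c) le_rfl (by omega) (by omega)]
        rw [hslice]
        -- cnt (c :: tail) r = S (r - c) + cnt tail r
        by_cases hr : 0 ≤ r
        · rw [cnt_step c (pvSlice coins (idx + 1) ei) r hcpos htail hr]
          ring
        · rw [if_neg (by omega : ¬ (0 : Int) ≤ r - c),
            cnt_neg r.toNat (pvSlice coins (idx + 1) ei) r htail (by omega),
            cnt_neg r.toNat (c :: pvSlice coins (idx + 1) ei) r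
              (by rw [hslice] at hpos; exact hpos) (by omega)]
          simp

-- ===== VERDICT (by name: the statement is the Claim_ definition above) =====
theorem coin_combinations_spec : Claim_equal_coin_combinations := by
  intro coins si ei t _ hpre
  unfold Spec_coin_combinations coin_combinations coin_combinations_alt
  by_cases ht0 : t = 0
  · subst ht0
    rw [coin_combinations_fuel, if_pos rfl, waysB_succ, if_pos rfl]
  · rcases hpre with h | h | h
    · exact absurd h ht0
    · -- empty index range: both sides return 0
      rw [coin_combinations_fuel, if_neg ht0, PySem.List.pyRange_one_eq_nil (by omega),
        List.foldl_nil, waysB_succ, if_neg ht0,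
        PySem.List.pyRange_one_eq_nil (by omega), List.foldl_nil]
    · obtain ⟨h0, hei, hpos⟩ := h
      rw [A_eq_cnt (t.toNat + (ei + 1 - si).toNat) coins ei t.toNat ((ei + 1 - si).toNat)
          si t le_rfl h0 hei le_rfl,
        B_eq_cnt (t.toNat + (ei + 1 - si).toNat) coins ei t.toNat ((ei + 1 - si).toNat)
          si t le_rfl h0 hei le_rfl hpos le_rfl]
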